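-- pv_equiv track=rewrite | github.com/MaxG87/dlna-tree | baue-baum.py | iter_nsplits
-- ===== SOURCE A (Python) =====
-- from typing import Iterable, List, Mapping, Tuple
--
-- SPLIT_POS_T = Tuple[int, ...]
--
-- def iter_nsplits(
--     num_elems: int, num_splits: int, start_idx: int = 1, start_tuple: SPLIT_POS_T = ()
-- ) -> Iterable[SPLIT_POS_T]:
--     if num_splits == 0:
--         yield start_tuple
--         return
--     for split_pos in range(start_idx, num_elems - num_splits + 1):
--         new_tuple = start_tuple + (split_pos,)
--         yield from iter_nsplits(
--             num_elems=num_elems,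
--             num_splits=num_splits - 1,
--             start_idx=split_pos + 1,
--             start_tuple=new_tuple,
--         )
-- ===== SOURCE B (Python) =====
-- def iter_nsplits(num_elems, num_splits, start_idx=1, start_tuple=()):
--     partials = [(tuple(start_tuple), start_idx)]
--     for rem in range(num_splits, 0, -1):
--         if not partials:
--             break
--         partials = [
--             (t + (p,), p + 1)
--             for (t, nxt) in partials
--             for p in range(nxt, num_elems - rem + 1)
--         ]
--     for t, _ in partials:
--         yield t
-- ===== Notes on version B (the rewrite author's own statement) =====
-- stated objective: alternative
-- what changed: Replaces the recursive yield-from generator with an iterative level-by-level construction: a list of (partial tuple, next start) pairs is extended num_splits times by one comprehension per round, so there is no recursion at all.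
-- outside the precondition, e.g. on iter_nsplits(0, -1, 5, ()): A returns [], B returns [()]
import Mathlib
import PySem

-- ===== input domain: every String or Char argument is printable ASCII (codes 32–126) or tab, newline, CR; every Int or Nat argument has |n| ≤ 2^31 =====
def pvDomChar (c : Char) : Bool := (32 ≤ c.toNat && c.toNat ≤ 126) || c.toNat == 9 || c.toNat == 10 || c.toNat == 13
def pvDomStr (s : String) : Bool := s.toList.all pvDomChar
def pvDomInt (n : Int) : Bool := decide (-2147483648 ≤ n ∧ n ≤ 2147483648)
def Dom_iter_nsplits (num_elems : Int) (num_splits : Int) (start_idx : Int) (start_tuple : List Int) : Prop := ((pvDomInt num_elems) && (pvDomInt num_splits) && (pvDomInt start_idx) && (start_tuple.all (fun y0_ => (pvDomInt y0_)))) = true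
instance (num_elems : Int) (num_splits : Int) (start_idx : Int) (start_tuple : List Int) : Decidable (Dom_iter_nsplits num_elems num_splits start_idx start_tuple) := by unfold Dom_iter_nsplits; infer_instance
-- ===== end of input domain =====

-- B replaces A's recursive yield-from enumeration by an iterative round-by-round construction
-- of (partial tuple, next start) pairs (objective: alternative decomposition, same cost).

-- ===== PORT A =====
-- A recurses on num_splits; fuel is num_splits.toNat (Pre_ restricts to num_splits ≥ 0,
-- where that IS num_splits). The 'for … yield from' loop is a foldl appending each
-- recursive call's output.
def iterA_rec (num_elems : Int) : Nat → Int → List Int → List (List Int)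
  | 0, _, start_tuple => [start_tuple]
  | n+1, start_idx, start_tuple =>
    (PySem.List.pyRange start_idx (num_elems - ((n : Int) + 1) + 1) 1).foldl
      (fun acc split_pos =>
        acc ++ iterA_rec num_elems n (split_pos + 1) (start_tuple ++ [split_pos])) []

def iter_nsplits (num_elems : Int) (num_splits : Int) (start_idx : Int) (start_tuple : List Int) : List (List Int) :=
  iterA_rec num_elems num_splits.toNat start_idx start_tuple

-- ===== PORT B =====
-- 'for rem in range(num_splits, 0, -1): if not partials: break; partials = [...]':
-- rem counts num_splits, num_splits-1, …, 1; the fuel n is rem's value, so Python's lazy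
-- countdown is the structural recursion below, and 'break' is the early return on [].
def iterB_loop (num_elems : Int) : Nat → List (List Int × Int) → List (List Int × Int)
  | 0, partials => partials
  | n+1, partials =>
    if partials.isEmpty then partials else
    iterB_loop num_elems n
      (partials.flatMap (fun q =>
        (PySem.List.pyRange q.2 (num_elems - ((n : Int) + 1) + 1) 1).map (fun p => (q.1 ++ [p], p + 1))))

def iter_nsplits_alt (num_elems : Int) (num_splits : Int) (start_idx : Int) (start_tuple : List Int) : List (List Int) :=
  (iterB_loop num_elems num_splits.toNat [(start_tuple, start_idx)]).map (·.1)

-- ===== PRECONDITION & SPEC =====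
-- Pre_ restricts to the natural domain num_splits ≥ 0: for num_splits < 0 the Python A
-- either raises RecursionError or (when the top-level range is already empty) returns [],
-- an accident no caller relies on; B yields start_tuple there.
def Pre_iter_nsplits (num_elems : Int) (num_splits : Int) (start_idx : Int) (start_tuple : List Int) : Prop :=
  0 ≤ num_splits
instance (num_elems : Int) (num_splits : Int) (start_idx : Int) (start_tuple : List Int) : Decidable (Pre_iter_nsplits num_elems num_splits start_idx start_tuple) := by unfold Pre_iter_nsplits; infer_instance

def pvWitness_iter_nsplits : Int × Int × Int × List Int := (5, 2, 1, [])

def Spec_iter_nsplits (num_elems : Int) (num_splits : Int) (start_idx : Int) (start_tuple : List Int) (out : List (List Int)) : Prop := out = iter_nsplits_alt num_elems num_splits start_idx start_tuple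
instance (num_elems : Int) (num_splits : Int) (start_idx : Int) (start_tuple : List Int) (out : List (List Int)) : Decidable (Spec_iter_nsplits num_elems num_splits start_idx start_tuple out) := by unfold Spec_iter_nsplits; infer_instance

-- ===== CLAIM (what is proved, stated in full; the proofs are below) =====
def Claim_equal_iter_nsplits : Prop := ∀ (num_elems : Int) (num_splits : Int) (start_idx : Int) (start_tuple : List Int), Dom_iter_nsplits num_elems num_splits start_idx start_tuple → Pre_iter_nsplits num_elems num_splits start_idx start_tuple → Spec_iter_nsplits num_elems num_splits start_idx start_tuple (iter_nsplits num_elems num_splits start_idx start_tuple)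


-- ===== LEMMAS AND PROOFS =====

-- Invariant of B's round loop: after n more rounds, the first components are exactly
-- what A's recursion at depth n emits from each pending (tuple, next-start) pair.
lemma iterB_loop_spec (num_elems : Int) (n : Nat) :
    ∀ partials : List (List Int × Int),
      (iterB_loop num_elems n partials).map (·.1)
        = partials.flatMap (fun q => iterA_rec num_elems n q.2 q.1) := by
  induction n with
  | zero =>
    intro partials
    simp only [iterB_loop, iterA_rec]
    induction partials with
    | nil => simp
    | cons q qs ihp => simp_all
  | succ n ih =>
    intro partials
    cases hp : partials with
    | nil => simp [iterB_loop]
    | cons q qs =>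
      rw [iterB_loop]
      rw [if_neg (by simp), ih]
      rw [List.flatMap_assoc]
      congr 1
      funext q
      rw [List.flatMap_map]
      show _ = iterA_rec num_elems (n + 1) q.2 q.1
      rw [iterA_rec]
      rw [PySem.List.foldl_append_eq_flatMap]
      simp

theorem iter_nsplits_spec : Claim_equal_iter_nsplits := by
  intro num_elems num_splits start_idx start_tuple _ hpre
  unfold Spec_iter_nsplits iter_nsplits iter_nsplits_alt
  rw [iterB_loop_spec]
  simp
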